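-- pv_equiv track=rewrite | github.com/Oneplus/smalltools | smalltools/utils/word2tags.py | BB2B3IESstyle
-- ===== SOURCE A (Python) =====
-- def BB2B3IESstyle(word, encoding=None):
--     if encoding is not None:
--         word = word.decode(encoding)
--
--     ret = []
--     if len(word) == 1:
--         ret.append("S")
--     else:
--         for i, c in enumerate(word):
--             if i == 0:
--                 ret.append("B")
--             elif i == len(word) - 1:
--                 ret.append("E")
--             elif i == 1:
--                 ret.append("B2")
--             elif i == 2:
--                 ret.append("B3")
--             else:
--                 ret.append("I")
--     return ret
-- ===== SOURCE B (Python) =====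
-- def BB2B3IESstyle(word, encoding=None):
--     if encoding is not None:
--         word = word.decode(encoding)
--     n = len(word)
--     if n == 0:
--         return []
--     if n == 1:
--         return ["S"]
--     tags = ["I"] * n
--     tags[0] = "B"
--     if n > 1:
--         tags[1] = "B2"
--     if n > 2:
--         tags[2] = "B3"
--     tags[-1] = "E"
--     return tags
-- ===== Notes on version B (the rewrite author's own statement) =====
-- stated objective: simpler
-- what changed: Replaces the per-character if/elif branch chain inside an enumerate loop with direct slot assignment: allocate ['I']*n, set the fixed prefix slots 0/1/2 and override the last slot with the end tag.
import Mathlib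
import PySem

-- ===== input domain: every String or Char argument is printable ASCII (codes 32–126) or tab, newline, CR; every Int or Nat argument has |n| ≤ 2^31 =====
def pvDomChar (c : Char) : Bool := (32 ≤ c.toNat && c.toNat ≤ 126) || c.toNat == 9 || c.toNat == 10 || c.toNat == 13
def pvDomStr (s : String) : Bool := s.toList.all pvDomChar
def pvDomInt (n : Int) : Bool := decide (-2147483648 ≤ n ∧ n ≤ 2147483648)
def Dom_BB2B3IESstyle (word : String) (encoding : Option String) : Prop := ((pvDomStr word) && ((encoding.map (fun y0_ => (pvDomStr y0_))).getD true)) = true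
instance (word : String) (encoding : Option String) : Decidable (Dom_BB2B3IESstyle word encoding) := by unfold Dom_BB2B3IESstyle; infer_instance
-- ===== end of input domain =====

-- B is a simpler decomposition: allocate ['I']*n and assign the fixed slots directly instead of
-- a per-character branch chain; return value only. Under Python 3 both programs raise
-- AttributeError whenever encoding is not None ('str' has no decode), so Pre_ admits only encoding = None.

-- ===== PORT A =====
def BB2B3IESstyle (word : String) (encoding : Option String) : List String :=
  match encoding with
  | some _ => []  -- Python 3: word.decode(encoding) raises AttributeError; excluded by Pre_
  | none =>
    let cs := word.toList
    if cs.length == 1 then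
      [] ++ ["S"]
    else
      (PySem.List.enumerate cs 0).foldl (fun ret ic =>
        ret ++ [if ic.1 = 0 then "B"
                else if ic.1 = (cs.length : Int) - 1 then "E"
                else if ic.1 = 1 then "B2"
                else if ic.1 = 2 then "B3"
                else "I"]) []

-- ===== PORT B =====
def BB2B3IESstyle_alt (word : String) (encoding : Option String) : List String :=
  match encoding with
  | some _ => []  -- Python 3: word.decode(encoding) raises AttributeError; excluded by Pre_
  | none =>
    let n := word.toList.length
    if n = 0 then []
    else if n = 1 then ["S"]
    else
      let tags := (List.replicate n "I").set 0 "B"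
      let tags := if n > 1 then tags.set 1 "B2" else tags
      let tags := if n > 2 then tags.set 2 "B3" else tags
      tags.set (n - 1) "E"  -- tags[-1], the final override

-- ===== PRECONDITION & SPEC =====
-- Pre_ excludes encoding ≠ None: there Python 3's str has no .decode and A raises AttributeError.
def Pre_BB2B3IESstyle (word : String) (encoding : Option String) : Prop := encoding = none
instance (word : String) (encoding : Option String) : Decidable (Pre_BB2B3IESstyle word encoding) := by unfold Pre_BB2B3IESstyle; infer_instance
def pvWitness_BB2B3IESstyle : String × Option String := ("abcd", none)
def Spec_BB2B3IESstyle (word : String) (encoding : Option String) (out : List String) : Prop := out = BB2B3IESstyle_alt word encoding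
instance (word : String) (encoding : Option String) (out : List String) : Decidable (Spec_BB2B3IESstyle word encoding out) := by unfold Spec_BB2B3IESstyle; infer_instance

-- ===== CLAIM (what is proved, stated in full; the proofs are below) =====
def Claim_equal_BB2B3IESstyle : Prop := ∀ (word : String) (encoding : Option String), Dom_BB2B3IESstyle word encoding → Pre_BB2B3IESstyle word encoding → Spec_BB2B3IESstyle word encoding (BB2B3IESstyle word encoding)

-- ===== LEMMAS AND PROOFS =====

lemma bb_core (cs : List Char) :
    (if cs.length == 1 then
      ([] : List String) ++ ["S"]
    else
      (PySem.List.enumerate cs 0).foldl (fun ret ic =>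
        ret ++ [if ic.1 = 0 then "B"
                else if ic.1 = (cs.length : Int) - 1 then "E"
                else if ic.1 = 1 then "B2"
                else if ic.1 = 2 then "B3"
                else "I"]) [])
    =
    (let n := cs.length
     if n = 0 then []
     else if n = 1 then ["S"]
     else
       let tags := (List.replicate n "I").set 0 "B"
       let tags := if n > 1 then tags.set 1 "B2" else tags
       let tags := if n > 2 then tags.set 2 "B3" else tags
       tags.set (n - 1) "E") := by
  simp only []
  rcases Nat.eq_zero_or_pos cs.length with h0 | hpos
  · rw [List.eq_nil_iff_length_eq_zero.mpr h0]
    simp [PySem.List.enumerate]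
  by_cases h1 : cs.length = 1
  · simp [h1]
  · have hge : 2 ≤ cs.length := by omega
    have hb : ¬ (cs.length == 1) = true := by simpa using h1
    have hz : cs.length ≠ 0 := by omega
    have hp : cs.length > 1 := by omega
    rw [if_neg hb, if_neg hz, if_neg h1, if_pos hp,
        PySem.List.foldl_append_singleton_eq_map, List.nil_append]
    by_cases h2 : cs.length = 2
    · have : ¬ cs.length > 2 := by omega
      rw [if_neg this]
      apply List.ext_getElem
      · simp
      · intro i hi _
        have hn : i < cs.length := by simpa using hi
        simp only [List.getElem_map, PySem.List.getElem_enumerate, List.getElem_set,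
          List.getElem_replicate]
        have hc0 : ((0 : Int) + (i : Int) = 0) ↔ i = 0 := by omega
        have hcE : ((0 : Int) + (i : Int) = (cs.length : Int) - 1) ↔ i = cs.length - 1 := by omega
        have hc1 : ((0 : Int) + (i : Int) = 1) ↔ i = 1 := by omega
        have hc2 : ((0 : Int) + (i : Int) = 2) ↔ i = 2 := by omega
        simp only [hc0, hcE, hc1, hc2]
        split_ifs <;> first | rfl | omega
    · have hgt : cs.length > 2 := by omega
      rw [if_pos hgt]
      apply List.ext_getElem
      · simp
      · intro i hi _
        have hn : i < cs.length := by simpa using hi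
        simp only [List.getElem_map, PySem.List.getElem_enumerate, List.getElem_set,
          List.getElem_replicate]
        have hc0 : ((0 : Int) + (i : Int) = 0) ↔ i = 0 := by omega
        have hcE : ((0 : Int) + (i : Int) = (cs.length : Int) - 1) ↔ i = cs.length - 1 := by omega
        have hc1 : ((0 : Int) + (i : Int) = 1) ↔ i = 1 := by omega
        have hc2 : ((0 : Int) + (i : Int) = 2) ↔ i = 2 := by omega
        simp only [hc0, hcE, hc1, hc2]
        split_ifs <;> first | rfl | omega

-- ===== VERDICT (by name: the statement is the Claim_ definition above) =====
theorem BB2B3IESstyle_spec : Claim_equal_BB2B3IESstyle := by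
  intro word encoding _ hpre
  subst hpre
  show BB2B3IESstyle word none = BB2B3IESstyle_alt word none
  unfold BB2B3IESstyle BB2B3IESstyle_alt
  exact bb_core word.toList
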